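-- pv_equiv track=rewrite | github.com/local-minimum/UnitySocial | app.py | get_sorted_ranked_scores
-- ===== SOURCE A (Python) =====
-- from functools import cmp_to_key
--
-- def get_sorted_scores(highscores, sort_cmp):
--     return sorted(highscores, key=cmp_to_key(lambda a, b: sort_cmp * (a["score"] - b["score"])))
--
-- def get_sorted_ranked_scores(highscores, sort_cmp):
--     scores = get_sorted_scores(highscores, sort_cmp)
--     val = None
--     rank = 0
--     count = 1
--     for score in scores:
--         if val is None or score['score'] != val:
--             val = score['score']
--             rank += count
--             count = 1
--         else:
--             count += 1
--         score.update(rank=rank)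
--     return scores
-- ===== SOURCE B (Python) =====
-- from functools import cmp_to_key
--
--
-- def get_sorted_scores(highscores, sort_cmp):
--     return sorted(highscores, key=cmp_to_key(lambda a, b: sort_cmp * (a["score"] - b["score"])))
--
--
-- def get_sorted_ranked_scores(highscores, sort_cmp):
--     # Competition rank, by definition: an entry's rank is 1 + the number of
--     # entries that strictly beat it under the comparator; no positional
--     # accumulator over the sorted list is needed.
--     scores = get_sorted_scores(highscores, sort_cmp)
--     for s in scores:
--         s.update(rank=1 + sum(1 for t in scores
--                               if sort_cmp * (t['score'] - s['score']) < 0))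
--     return scores
-- ===== Notes on version B (the rewrite author's own statement) =====
-- stated objective: alternative
-- what changed: Ranks are no longer produced by scanning the sorted list with a val/rank/count run accumulator: each entry's rank is computed independently as 1 + the number of entries that strictly beat it under the comparator (the definition of competition rank), trading the linear scan for a per-element count.
-- intended difference: When sort_cmp == 0 every comparison ties, but A assigns ranks 1,2,3,... to the runs of equal scores in the (unsorted) input order, while B gives every entry rank 1, which is the intended competition rank when all entries tie. — e.g. on get_sorted_ranked_scores([[("score", 1)], [("score", 2)]], 0): A returns [[("score", 1), ("rank", 1)], [("score", 2), ("rank", 2)]], B returns [[("score", 1), ("rank", 1)], [("score", 2), ("rank", 1)]]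
import Mathlib
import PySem

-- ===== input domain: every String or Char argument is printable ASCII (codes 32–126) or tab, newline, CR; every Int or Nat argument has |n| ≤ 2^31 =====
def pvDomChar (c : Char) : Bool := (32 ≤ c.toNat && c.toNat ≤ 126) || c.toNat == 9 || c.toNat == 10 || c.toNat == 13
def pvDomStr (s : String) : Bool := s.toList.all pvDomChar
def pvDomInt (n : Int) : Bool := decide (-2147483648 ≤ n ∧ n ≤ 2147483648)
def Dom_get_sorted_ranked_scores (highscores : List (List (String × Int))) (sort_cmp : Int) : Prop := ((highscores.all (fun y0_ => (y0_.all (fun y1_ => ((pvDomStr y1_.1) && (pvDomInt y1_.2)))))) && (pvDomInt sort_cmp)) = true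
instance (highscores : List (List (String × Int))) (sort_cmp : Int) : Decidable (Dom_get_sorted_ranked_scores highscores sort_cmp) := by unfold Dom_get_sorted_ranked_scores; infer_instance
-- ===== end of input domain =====

-- B replaces A's val/rank/count run-scan over the sorted list by the definitional competition
-- rank (1 + number of entries the comparator ranks strictly better); both Pythons mutate the
-- input dicts in place — the equivalence proved here is about the RETURN value.

-- ===== PORT A =====

-- d["score"]; the key is present under Pre_ (where it is absent Python raises KeyError)
def pvScore (d : List (String × Int)) : Int := PySem.Dict.getD ⟨d⟩ "score" 0

-- d.update(rank=r): overwrite "rank" in place or append it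
def pvRank (d : List (String × Int)) (r : Int) : List (String × Int) :=
  (PySem.Dict.insert ⟨d⟩ "rank" r).items

-- sorted(xs, key=cmp_to_key(lambda a, b: sort_cmp * (a["score"] - b["score"]))): hand port of the
-- comparator sort as a stable insertion sort w.r.t. the comparator (exact: Python's sort is stable
-- and the comparator is a total preorder, so every stable sort returns the same list)
def get_sorted_scores (highscores : List (List (String × Int))) (sort_cmp : Int) : List (List (String × Int)) :=
  highscores.foldl
    (fun acc x => PySem.List.insertBy (fun a b => decide (sort_cmp * (pvScore a - pvScore b) < 0)) x acc) []

-- the for-loop of A over the sorted list, with state (val, rank, count)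
def pvALoop (scores : List (List (String × Int))) (val : Option Int) (rank count : Int) :
    List (List (String × Int)) :=
  match scores with
  | [] => []
  | s :: t =>
    if (match val with | none => true | some v => pvScore s != v) then
      pvRank s (rank + count) :: pvALoop t (some (pvScore s)) (rank + count) 1
    else
      pvRank s rank :: pvALoop t val rank (count + 1)

def get_sorted_ranked_scores (highscores : List (List (String × Int))) (sort_cmp : Int) :
    List (List (String × Int)) :=
  pvALoop (get_sorted_scores highscores sort_cmp) none 0 1

-- ===== PORT B =====

-- sum(1 for t in scores if sort_cmp * (t['score'] - s['score']) < 0)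
def pvBetterCount (scores : List (List (String × Int))) (sort_cmp : Int) (s : List (String × Int)) : Int :=
  scores.foldl (fun acc t => if sort_cmp * (pvScore t - pvScore s) < 0 then acc + 1 else acc) 0

def get_sorted_ranked_scores_alt (highscores : List (List (String × Int))) (sort_cmp : Int) :
    List (List (String × Int)) :=
  let scores := get_sorted_scores highscores sort_cmp
  scores.map (fun s => pvRank s (1 + pvBetterCount scores sort_cmp s))

-- ===== PRECONDITION & SPEC =====
-- Pre_ excludes exactly the inputs where the Python raises KeyError: some dict lacks the key "score".
def Pre_get_sorted_ranked_scores (highscores : List (List (String × Int))) (sort_cmp : Int) : Prop :=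
  ∀ d ∈ highscores, (PySem.Dict.get? (⟨d⟩ : PySem.Dict String Int) "score").isSome = true
instance (highscores : List (List (String × Int))) (sort_cmp : Int) : Decidable (Pre_get_sorted_ranked_scores highscores sort_cmp) := by unfold Pre_get_sorted_ranked_scores; infer_instance
def pvWitness_get_sorted_ranked_scores : (List (List (String × Int))) × Int :=
  ([[("score", 3)], [("score", 1), ("rank", 7)], [("score", 3)]], 1)

-- When sort_cmp == 0 every comparison ties, but A assigns ranks 1,2,3,… to the runs of equal
-- scores in the (unsorted) input order, while B gives every entry rank 1, which is the intended
-- competition rank when all entries tie.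
def D_get_sorted_ranked_scores (highscores : List (List (String × Int))) (sort_cmp : Int) : Prop :=
  sort_cmp = 0 ∧
    ¬ List.IsChain (fun a b => PySem.Dict.getD (⟨a⟩ : PySem.Dict String Int) "score" 0
                             = PySem.Dict.getD (⟨b⟩ : PySem.Dict String Int) "score" 0) highscores
instance (highscores : List (List (String × Int))) (sort_cmp : Int) : Decidable (D_get_sorted_ranked_scores highscores sort_cmp) := by unfold D_get_sorted_ranked_scores; infer_instance

def Spec_get_sorted_ranked_scores (highscores : List (List (String × Int))) (sort_cmp : Int) (out : List (List (String × Int))) : Prop := ¬ D_get_sorted_ranked_scores highscores sort_cmp → out = get_sorted_ranked_scores_alt highscores sort_cmp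
instance (highscores : List (List (String × Int))) (sort_cmp : Int) (out : List (List (String × Int))) : Decidable (Spec_get_sorted_ranked_scores highscores sort_cmp out) := by unfold Spec_get_sorted_ranked_scores; infer_instance

def pvDiffWitness_get_sorted_ranked_scores : (List (List (String × Int))) × Int :=
  ([[("score", 1)], [("score", 2)]], 0)
def pvDiffWitnessOut_get_sorted_ranked_scores : (List (List (String × Int))) × (List (List (String × Int))) :=
  ([[("score", 1), ("rank", 1)], [("score", 2), ("rank", 2)]],
   [[("score", 1), ("rank", 1)], [("score", 2), ("rank", 1)]])

-- ===== CLAIM (what is proved, stated in full; the proofs are below) =====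
def Claim_unchanged_get_sorted_ranked_scores : Prop := ∀ (highscores : List (List (String × Int))) (sort_cmp : Int), Dom_get_sorted_ranked_scores highscores sort_cmp → Pre_get_sorted_ranked_scores highscores sort_cmp → Spec_get_sorted_ranked_scores highscores sort_cmp (get_sorted_ranked_scores highscores sort_cmp)
def Claim_changed_get_sorted_ranked_scores : Prop := Dom_get_sorted_ranked_scores (pvDiffWitness_get_sorted_ranked_scores.1) (pvDiffWitness_get_sorted_ranked_scores.2) ∧ Pre_get_sorted_ranked_scores (pvDiffWitness_get_sorted_ranked_scores.1) (pvDiffWitness_get_sorted_ranked_scores.2) ∧ D_get_sorted_ranked_scores (pvDiffWitness_get_sorted_ranked_scores.1) (pvDiffWitness_get_sorted_ranked_scores.2) ∧ get_sorted_ranked_scores (pvDiffWitness_get_sorted_ranked_scores.1) (pvDiffWitness_get_sorted_ranked_scores.2) = pvDiffWitnessOut_get_sorted_ranked_scores.1 ∧ get_sorted_ranked_scores_alt (pvDiffWitness_get_sorted_ranked_scores.1) (pvDiffWitness_get_sorted_ranked_scores.2) = pvDiffWitnessOut_get_sorted_ranked_scores.2 ∧ pvDiffWitnessOut_get_sorted_ranked_scores.1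 ≠ pvDiffWitnessOut_get_sorted_ranked_scores.2
def Claim_exact_get_sorted_ranked_scores : Prop := ∀ (highscores : List (List (String × Int))) (sort_cmp : Int), Dom_get_sorted_ranked_scores highscores sort_cmp → Pre_get_sorted_ranked_scores highscores sort_cmp → D_get_sorted_ranked_scores highscores sort_cmp → get_sorted_ranked_scores highscores sort_cmp ≠ get_sorted_ranked_scores_alt highscores sort_cmp

-- ===== LEMMAS AND PROOFS =====

-- the strictly-better count of B, as a countP over the (fixed) sorted list
def pvN (L : List (List (String × Int))) (c w : Int) : Int :=
  (L.countP (fun t => decide (c * pvScore t < w)) : Int)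

-- the pairwise property the sorted list has on every admitted input:
-- keys are nondecreasing, and a score change forces a strict key increase
def pvQ (c : Int) (a b : List (String × Int)) : Prop :=
  c * pvScore a ≤ c * pvScore b ∧ (pvScore a ≠ pvScore b → c * pvScore a < c * pvScore b)

theorem pvBetterCount_eq (L : List (List (String × Int))) (c : Int) (s : List (String × Int)) :
    pvBetterCount L c s = pvN L c (c * pvScore s) := by
  have h : ∀ t : List (String × Int),
      (c * (pvScore t - pvScore s) < 0) = (c * pvScore t < c * pvScore s) :=
    fun t => propext (by rw [mul_sub, sub_neg])
  have hfc := PySem.List.foldl_count_if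
    (fun t : List (String × Int) => decide (c * pvScore t < c * pvScore s)) L 0
  simp only [decide_eq_true_eq] at hfc
  unfold pvBetterCount pvN
  simp only [h]
  rw [hfc, zero_add]

-- A's sort is sorted(xs, key = sort_cmp * score)
theorem pv_sort_eq (hs : List (List (String × Int))) (c : Int) :
    get_sorted_scores hs c = PySem.List.sorted hs (fun s => c * pvScore s) := by
  have hf : (fun a b : List (String × Int) => decide (c * (pvScore a - pvScore b) < 0))
          = (fun a b : List (String × Int) => decide (c * pvScore a < c * pvScore b)) := by
    funext a b
    exact decide_eq_decide.mpr (by rw [mul_sub, sub_neg])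
  unfold get_sorted_scores
  rw [hf, ← PySem.List.sorted_eq_foldl_insertBy]

-- unfolding steps of A's loop
theorem pvALoop_cons_none (x : List (String × Int)) (t : List (List (String × Int)))
    (r c : Int) :
    pvALoop (x :: t) none r c = pvRank x (r + c) :: pvALoop t (some (pvScore x)) (r + c) 1 := rfl

theorem pvALoop_cons_some (x : List (String × Int)) (t : List (List (String × Int)))
    (v : Int) (r c : Int) :
    pvALoop (x :: t) (some v) r c =
      if pvScore x != v then
        pvRank x (r + c) :: pvALoop t (some (pvScore x)) (r + c) 1
      else
        pvRank x r :: pvALoop t (some v) r (c + 1) := rfl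

-- at a score break, the strictly-better count is exactly the number of consumed entries
theorem pvN_at_break (c : Int) (Pref t : List (List (String × Int))) (x : List (String × Int))
    (hQ : (Pref ++ x :: t).Pairwise (pvQ c))
    (hlt : ∀ p ∈ Pref, c * pvScore p < c * pvScore x) :
    pvN (Pref ++ x :: t) c (c * pvScore x) = (Pref.length : Int) := by
  unfold pvN
  rw [List.countP_append]
  have h1 : (Pref.countP (fun t' => decide (c * pvScore t' < c * pvScore x))) = Pref.length :=
    List.countP_eq_length.mpr (fun p hp => decide_eq_true (hlt p hp))
  have h2 : ((x :: t).countP (fun t' => decide (c * pvScore t' < c * pvScore x))) = 0 := by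
    apply List.countP_eq_zero.mpr
    intro q hq
    simp only [decide_eq_true_eq, not_lt]
    rcases List.mem_cons.mp hq with h | h
    · subst h; exact le_refl _
    · exact ((List.pairwise_cons.mp (List.pairwise_append.mp hQ).2.1).1 q h).1
  rw [h1, h2]
  simp

-- A's run-scan related to the strictly-better counts: x0 is the last consumed entry, r its rank
-- (1 + its strictly-better count), and r + cc - 2 the number of entries consumed before it
theorem pvALoop_rank_aux (c : Int) (L : List (List (String × Int)))
    (hQ : L.Pairwise (pvQ c)) :
    ∀ (M P1 : List (List (String × Int))) (x0 : List (String × Int)) (r cc : Int),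
      L = P1 ++ x0 :: M →
      r = 1 + pvN L c (c * pvScore x0) →
      r + cc = (P1.length : Int) + 2 →
      pvALoop M (some (pvScore x0)) r cc
        = M.map (fun s => pvRank s (1 + pvN L c (c * pvScore s))) := by
  intro M
  induction M with
  | nil => intro P1 x0 r cc _ _ _; rfl
  | cons x t ih =>
    intro P1 x0 r cc hL hr hrc
    rw [pvALoop_cons_some, List.map_cons]
    by_cases hx : pvScore x = pvScore x0
    · have hb : (pvScore x != pvScore x0) = false := by simp [hx]
      rw [hb]
      simp only [Bool.false_eq_true, if_false]
      have hhead : r = 1 + pvN L c (c * pvScore x) := by rw [hx]; exact hr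
      have htail := ih (P1 ++ [x0]) x r (cc + 1)
        (by rw [hL, List.append_assoc]; rfl)
        (by rw [hx]; exact hr)
        (by simp; omega)
      rw [← hx, htail, hhead]
    · have hb : (pvScore x != pvScore x0) = true := by simp [hx]
      rw [hb]
      simp only [if_true]
      -- every consumed entry is strictly better than x
      have hL' : L = (P1 ++ [x0]) ++ x :: t := by rw [hL, List.append_assoc]; rfl
      have hQ' : ((P1 ++ [x0]) ++ x :: t).Pairwise (pvQ c) := by rw [← hL']; exact hQ
      have hsplit := List.pairwise_append.mp hQ'
      have hx0x : pvQ c x0 x :=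
        hsplit.2.2 x0 (List.mem_append_right _ (List.mem_singleton_self x0))
          x List.mem_cons_self
      have hlast : c * pvScore x0 < c * pvScore x := hx0x.2 (fun he => hx he.symm)
      have hlt : ∀ p ∈ P1 ++ [x0], c * pvScore p < c * pvScore x := by
        intro p hp
        rcases List.mem_append.mp hp with h | h
        · have hpx0 : pvQ c p x0 :=
            (List.pairwise_append.mp (List.pairwise_append.mp hQ').1).2.2 p h
              x0 (List.mem_singleton_self x0)
          exact lt_of_le_of_lt hpx0.1 hlast
        · rw [List.mem_singleton.mp h]; exact hlast
      have hN : pvN L c (c * pvScore x) = ((P1 ++ [x0]).length : Int) := by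
        rw [hL']; exact pvN_at_break c (P1 ++ [x0]) t x hQ' hlt
      have hrcN : r + cc = 1 + pvN L c (c * pvScore x) := by
        rw [hN]; simp; omega
      have htail := ih (P1 ++ [x0]) x (r + cc) 1
        hL' hrcN (by simp; omega)
      rw [htail, hrcN]

-- the full run-scan computes the strictly-better ranks
theorem pvALoop_eq (c : Int) (L : List (List (String × Int)))
    (hQ : L.Pairwise (pvQ c)) :
    pvALoop L none 0 1 = L.map (fun s => pvRank s (1 + pvN L c (c * pvScore s))) := by
  cases L with
  | nil => rfl
  | cons x t =>
    rw [pvALoop_cons_none, List.map_cons]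
    have hN : pvN (x :: t) c (c * pvScore x) = 0 := by
      unfold pvN
      have : ((x :: t).countP (fun t' => decide (c * pvScore t' < c * pvScore x))) = 0 := by
        apply List.countP_eq_zero.mpr
        intro q hq
        simp only [decide_eq_true_eq, not_lt]
        rcases List.mem_cons.mp hq with h | h
        · subst h; exact le_refl _
        · exact ((List.pairwise_cons.mp hQ).1 q h).1
      rw [this]; rfl
    have htail := pvALoop_rank_aux c (x :: t) hQ t [] x (0 + 1) 1 rfl
      (by rw [hN]; norm_num) (by norm_num)
    rw [htail, hN]
    norm_num

-- common assembly: under the pairwise property of the sorted list, A = B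
theorem pv_main_eq (hs : List (List (String × Int))) (c : Int)
    (hQ : (PySem.List.sorted hs (fun s => c * pvScore s)).Pairwise (pvQ c)) :
    get_sorted_ranked_scores hs c = get_sorted_ranked_scores_alt hs c := by
  show pvALoop (get_sorted_scores hs c) none 0 1
      = (get_sorted_scores hs c).map (fun s => pvRank s (1 + pvBetterCount (get_sorted_scores hs c) c s))
  rw [List.map_congr_left (fun s _ => by rw [pvBetterCount_eq])]
  rw [pv_sort_eq]
  exact pvALoop_eq c _ hQ

-- the pairwise property, first for sort_cmp ≠ 0 …
theorem pvQ_of_ne (hs : List (List (String × Int))) (c : Int) (hc : c ≠ 0) :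
    (PySem.List.sorted hs (fun s => c * pvScore s)).Pairwise (pvQ c) :=
  (PySem.List.sorted_pairwise hs (fun s => c * pvScore s)).imp
    (fun {a b} h => ⟨h, fun hne => lt_of_le_of_ne h (fun he => hne (mul_left_cancel₀ hc he))⟩)

-- … then for sort_cmp = 0 when all adjacent input scores agree (¬ D_): every score is the head's
theorem pv_chain_head_eq :
    ∀ (t : List (List (String × Int))) (x : List (String × Int)),
      List.IsChain (fun a b => pvScore a = pvScore b) (x :: t) →
      ∀ a ∈ x :: t, pvScore a = pvScore x := by
  intro t
  induction t with
  | nil => intro x _ a ha; rw [List.mem_singleton.mp ha]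
  | cons y t' ih =>
    intro x hch a ha
    have h := List.isChain_cons_cons.mp hch
    rcases List.mem_cons.mp ha with h1 | h1
    · rw [h1]
    · exact (ih y h.2 a h1).trans h.1.symm

theorem pvQ_of_alleq (hs : List (List (String × Int)))
    (hall : ∀ a ∈ hs, ∀ b ∈ hs, pvScore a = pvScore b) :
    (PySem.List.sorted hs (fun s => (0 : Int) * pvScore s)).Pairwise (pvQ 0) :=
  (PySem.List.sorted_pairwise hs (fun s => (0 : Int) * pvScore s)).imp_of_mem
    (fun {a b} ha hb h =>
      ⟨h, fun hne => absurd
        (hall a ((PySem.List.mem_sorted hs _ false a).mp ha)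
                b ((PySem.List.mem_sorted hs _ false b).mp hb)) hne⟩)

-- injectivity of the rank update in the rank value
theorem pvRank_inj (d : List (String × Int)) (r r' : Int) (h : pvRank d r = pvRank d r') :
    r = r' := by
  have hd : (PySem.Dict.insert (⟨d⟩ : PySem.Dict String Int) "rank" r)
          = (PySem.Dict.insert (⟨d⟩ : PySem.Dict String Int) "rank" r') :=
    PySem.Dict.ext_iff.mpr h
  have hg := congrArg (fun dd : PySem.Dict String Int => dd.get? "rank") hd
  simp only [PySem.Dict.get?_insert_self] at hg
  exact Option.some.inj hg

-- with sort_cmp = 0 the sort is the identity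
theorem pv_sort_zero (hs : List (List (String × Int))) : get_sorted_scores hs 0 = hs := by
  rw [pv_sort_eq]
  exact PySem.List.sorted_eq_self_of_pairwise hs (fun s => (0 : Int) * pvScore s)
    (List.pairwise_of_forall_sublist (fun {a b} _ => by simp))

-- with sort_cmp = 0 B ranks every entry 1
theorem pv_alt_zero (hs : List (List (String × Int))) :
    get_sorted_ranked_scores_alt hs 0 = hs.map (fun s => pvRank s 1) := by
  show (get_sorted_scores hs 0).map
      (fun s => pvRank s (1 + pvBetterCount (get_sorted_scores hs 0) 0 s)) = _
  rw [pv_sort_zero]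
  apply List.map_congr_left
  intro s _
  have : pvBetterCount hs 0 s = 0 := by
    rw [pvBetterCount_eq]
    unfold pvN
    simp
  rw [this]
  norm_num

-- on a broken chain, A's run-scan cannot rank everything 1
theorem pv_exact_aux :
    ∀ (t : List (List (String × Int))) (x0 : List (String × Int)) (r cc : Int),
      1 ≤ r → 1 ≤ cc →
      ¬ List.IsChain (fun a b => pvScore a = pvScore b) (x0 :: t) →
      pvALoop t (some (pvScore x0)) r cc ≠ t.map (fun s => pvRank s 1) := by
  intro t
  induction t with
  | nil => intro x0 r cc _ _ hnch; exact absurd (by simp) hnch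
  | cons y t' ih =>
    intro x0 r cc hr hcc hnch
    rw [pvALoop_cons_some, List.map_cons]
    by_cases hy : pvScore y = pvScore x0
    · have hb : (pvScore y != pvScore x0) = false := by simp [hy]
      rw [hb]
      simp only [Bool.false_eq_true, if_false]
      intro heq
      have h2 := (List.cons.injEq _ _ _ _).mp heq |>.2
      have hnch' : ¬ List.IsChain (fun a b => pvScore a = pvScore b) (y :: t') :=
        fun h => hnch (List.isChain_cons_cons.mpr ⟨hy.symm, h⟩)
      rw [← hy] at h2
      exact ih y r (cc + 1) hr (by omega) hnch' h2
    · have hb : (pvScore y != pvScore x0) = true := by simp [hy]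
      rw [hb]
      simp only [if_true]
      intro heq
      have h1 := (List.cons.injEq _ _ _ _).mp heq |>.1
      have := pvRank_inj y (r + cc) 1 h1
      omega

-- ===== VERDICT (by name: the statements are the Claim_ definitions above) =====
theorem get_sorted_ranked_scores_spec : Claim_unchanged_get_sorted_ranked_scores := by
  intro hs c _ _ hnD
  by_cases hc : c = 0
  · subst hc
    have hch : List.IsChain (fun a b => pvScore a = pvScore b) hs := by
      by_contra h
      exact hnD ⟨rfl, h⟩
    have hall : ∀ a ∈ hs, ∀ b ∈ hs, pvScore a = pvScore b := by
      cases hs with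
      | nil => intro a ha; exact absurd ha (List.not_mem_nil)
      | cons x t =>
        intro a ha b hb
        exact (pv_chain_head_eq t x hch a ha).trans (pv_chain_head_eq t x hch b hb).symm
    exact pv_main_eq hs 0 (pvQ_of_alleq hs hall)
  · exact pv_main_eq hs c (pvQ_of_ne hs c hc)

theorem get_sorted_ranked_scores_changed : Claim_changed_get_sorted_ranked_scores := by
  unfold Claim_changed_get_sorted_ranked_scores
  decide

theorem get_sorted_ranked_scores_tight : Claim_exact_get_sorted_ranked_scores := by
  intro hs c _ _ hD
  obtain ⟨hc, hnch⟩ := hD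
  subst hc
  have hnch' : ¬ List.IsChain (fun a b => pvScore a = pvScore b) hs := hnch
  have hA : get_sorted_ranked_scores hs 0 = pvALoop hs none 0 1 := by
    show pvALoop (get_sorted_scores hs 0) none 0 1 = _
    rw [pv_sort_zero]
  rw [hA, pv_alt_zero]
  cases hs with
  | nil => exact absurd (by simp) hnch'
  | cons x t =>
    rw [pvALoop_cons_none, List.map_cons]
    intro heq
    have h2 := (List.cons.injEq _ _ _ _).mp heq |>.2
    exact pv_exact_aux t x (0 + 1) 1 (by norm_num) (by norm_num)
      hnch' h2
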